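-- pv_equiv track=rewrite | github.com/khoi-space/Leetcode-Note | update_list.py | check_duplicate_link
-- ===== SOURCE A (Python) =====
-- def check_duplicate_link(lines, entry_idx, lang_line):
--     """Check if the language link already exists in the entry block for a problem."""
--     entry_end = entry_idx + 1
--     while entry_end < len(lines) and (lines[entry_end].startswith("    * ") or lines[entry_end].strip() == ""):
--         entry_end += 1
--     lang_line_normalized = lang_line.replace(' ', '').lower()
--     for j in range(entry_idx+1, entry_end):
--         line_j = lines[j].replace(' ', '').lower()
--         if line_j == lang_line_normalized or line_j == f'<!--{lang_line_normalized}-->':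
--             return True
--     return False
-- ===== SOURCE B (Python) =====
-- def check_duplicate_link(lines, entry_idx, lang_line):
--     """Single pass over the entry block: normalize each block line once and
--     compare against the precomputed pair of targets, stopping at the first
--     non-block line."""
--     t = lang_line.replace(' ', '').lower()
--     targets = (t, '<!--' + t + '-->')
--     j = entry_idx + 1
--     while j < len(lines) and (lines[j].startswith("    * ") or lines[j].strip() == ""):
--         if lines[j].replace(' ', '').lower() in targets:
--             return True
--         j += 1
--     return False
-- ===== Notes on version B (the rewrite author's own statement) =====
-- stated objective: simpler
-- what changed: Fuses A's two passes (boundary-finding while loop, then a range re-scan that re-reads and re-normalizes each line) into one single-pass loop that normalizes each block line once and compares it against a precomputed target pair, returning as soon as a match or a non-block line is seen.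
import Mathlib
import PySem

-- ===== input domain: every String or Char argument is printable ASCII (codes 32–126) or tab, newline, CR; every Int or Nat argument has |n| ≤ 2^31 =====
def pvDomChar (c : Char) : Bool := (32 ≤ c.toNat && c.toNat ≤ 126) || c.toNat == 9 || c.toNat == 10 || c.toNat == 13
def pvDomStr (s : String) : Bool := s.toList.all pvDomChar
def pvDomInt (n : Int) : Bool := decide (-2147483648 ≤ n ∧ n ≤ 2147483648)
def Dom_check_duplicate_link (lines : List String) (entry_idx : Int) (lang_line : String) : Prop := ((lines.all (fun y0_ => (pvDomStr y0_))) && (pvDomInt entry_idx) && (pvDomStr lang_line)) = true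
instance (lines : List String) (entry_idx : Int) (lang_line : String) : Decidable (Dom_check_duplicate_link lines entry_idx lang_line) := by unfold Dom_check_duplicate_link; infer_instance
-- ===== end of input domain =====

-- B fuses A's two passes (find the block end, then re-scan the range) into one
-- single-pass loop with a precomputed target pair and early exit; same result.

-- shared helpers: both Pythons contain literally these expressions
-- line.replace(' ', '').lower()
def pvNorm (s : String) : String := PySem.Str.lower (PySem.Str.replace s " " "")
-- lines[j].startswith("    * ") or lines[j].strip() == ""
def pvIsBlock (s : String) : Bool := PySem.Str.startswith s "    * " || PySem.Str.strip s == ""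

-- ===== PORT A =====
-- the 'while entry_end < len(lines) and …' loop; lines[entry_end] via pyGet?
-- (.getD "" covers the IndexError case, excluded by Pre_)
def pvFindEnd (lines : List String) (e : Int) : Int :=
  if h : e < (lines.length : Int) ∧ pvIsBlock ((PySem.List.pyGet? lines e).getD "") = true
  then pvFindEnd lines (e + 1) else e
termination_by ((lines.length : Int) - e).toNat
decreasing_by omega

def check_duplicate_link (lines : List String) (entry_idx : Int) (lang_line : String) : Bool :=
  let entry_end := pvFindEnd lines (entry_idx + 1)
  let t := pvNorm lang_line
  -- for j in range(entry_idx+1, entry_end): … return True / fall through to False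
  (PySem.List.pyRange (entry_idx + 1) entry_end 1).any (fun j =>
    let lj := pvNorm ((PySem.List.pyGet? lines j).getD "")
    lj == t || lj == "<!--" ++ t ++ "-->")

-- ===== PORT B =====
-- Source B's single while loop: stop at len or at the first non-block line,
-- return True on the first normalized match against the target pair
def pvGo (lines : List String) (t t2 : String) (j : Int) : Bool :=
  if _h : j < (lines.length : Int) then
    match PySem.List.pyGet? lines j with
    | none => false          -- IndexError in Python, excluded by Pre_
    | some s =>
      if pvIsBlock s then
        if pvNorm s == t || pvNorm s == t2 then true
        else pvGo lines t t2 (j + 1)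
      else false
  else false
termination_by ((lines.length : Int) - j).toNat
decreasing_by omega

def check_duplicate_link_alt (lines : List String) (entry_idx : Int) (lang_line : String) : Bool :=
  let t := pvNorm lang_line
  pvGo lines t ("<!--" ++ t ++ "-->") (entry_idx + 1)

-- ===== PRECONDITION & SPEC =====
-- Pre_ excludes exactly the inputs where Python A raises IndexError: the very
-- first access lines[entry_idx+1] with entry_idx+1 < -len(lines).
def Pre_check_duplicate_link (lines : List String) (entry_idx : Int) (lang_line : String) : Prop :=
  -(lines.length : Int) ≤ entry_idx + 1
instance (lines : List String) (entry_idx : Int) (lang_line : String) : Decidable (Pre_check_duplicate_link lines entry_idx lang_line) := by unfold Pre_check_duplicate_link; infer_instance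

def pvWitness_check_duplicate_link : List String × Int × String :=
  (["## List", "    * [Python](./p.py)", ""], 0, "    * [Java](./p.java)")

def Spec_check_duplicate_link (lines : List String) (entry_idx : Int) (lang_line : String) (out : Bool) : Prop := out = check_duplicate_link_alt lines entry_idx lang_line
instance (lines : List String) (entry_idx : Int) (lang_line : String) (out : Bool) : Decidable (Spec_check_duplicate_link lines entry_idx lang_line out) := by unfold Spec_check_duplicate_link; infer_instance

-- ===== CLAIM (what is proved, stated in full; the proofs are below) =====
def Claim_equal_check_duplicate_link : Prop := ∀ (lines : List String) (entry_idx : Int) (lang_line : String), Dom_check_duplicate_link lines entry_idx lang_line → Pre_check_duplicate_link lines entry_idx lang_line → Spec_check_duplicate_link lines entry_idx lang_line (check_duplicate_link lines entry_idx lang_line)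

-- ===== LEMMAS AND PROOFS =====

theorem pvWitness_ok : Dom_check_duplicate_link pvWitness_check_duplicate_link.1 pvWitness_check_duplicate_link.2.1 pvWitness_check_duplicate_link.2.2 ∧ Pre_check_duplicate_link pvWitness_check_duplicate_link.1 pvWitness_check_duplicate_link.2.1 pvWitness_check_duplicate_link.2.2 := by
  constructor <;> decide

theorem le_pvFindEnd (lines : List String) (e : Int) : e ≤ pvFindEnd lines e := by
  fun_induction pvFindEnd lines e with
  | case1 e h ih => omega
  | case2 e h => omega

theorem pvGo_eq (lines : List String) (t : String) (e : Int)
    (he : -(lines.length : Int) ≤ e) :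
    pvGo lines t ("<!--" ++ t ++ "-->") e =
      (PySem.List.pyRange e (pvFindEnd lines e) 1).any (fun j =>
        let lj := pvNorm ((PySem.List.pyGet? lines j).getD "")
        lj == t || lj == "<!--" ++ t ++ "-->") := by
  fun_induction pvGo lines t ("<!--" ++ t ++ "-->") e with
  | case1 j hj hnone =>
    rw [PySem.List.pyGet?_eq_none_iff] at hnone
    exact absurd (by simp [PySem.Raise.InRange]; omega) hnone
  | case2 j hj s hsome hblock hmatch =>
    -- block line, match found
    rw [pvFindEnd]
    simp only [hsome, Option.getD_some, hj, hblock, and_self, dite_true]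
    rw [PySem.List.pyRange_one_cons (by have := le_pvFindEnd lines (j + 1); omega)]
    simp [hsome, hmatch]
  | case3 j hj s hsome hblock hmatch ih =>
    -- block line, no match: recurse
    rw [pvFindEnd]
    simp only [hsome, Option.getD_some, hj, hblock, and_self, dite_true]
    rw [PySem.List.pyRange_one_cons (by have := le_pvFindEnd lines (j + 1); omega)]
    simp only [List.any_cons, hsome, Option.getD_some]
    rw [ih (by omega)]
    simp [hmatch]
  | case4 j hj s hsome hblock =>
    -- non-block line ends the block
    rw [pvFindEnd]
    simp only [hsome, Option.getD_some, hj, hblock]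
    simp [PySem.List.pyRange_one_eq_nil (le_refl j)]
  | case5 j hj =>
    -- j ≥ len(lines)
    rw [pvFindEnd]
    simp only [hj, false_and, dite_false]
    simp [PySem.List.pyRange_one_eq_nil (le_refl j)]

-- ===== VERDICT (by name: the statement is the Claim_ definition above) =====
theorem check_duplicate_link_spec : Claim_equal_check_duplicate_link := by
  intro lines entry_idx lang_line _ hpre
  unfold Spec_check_duplicate_link check_duplicate_link check_duplicate_link_alt
  exact (pvGo_eq lines (pvNorm lang_line) (entry_idx + 1) hpre).symm
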